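-- pv_equiv track=rewrite | github.com/HanboBizl/RingMoE | register/config.py | find_next_comma
-- ===== SOURCE A (Python) =====
-- def find_next_comma(val_str):
--     """find the position of next comma in the string.
--
--     note:
--         '(' and ')' or '[' and']' must appear in pairs or not exist.
--     """
--     assert (val_str.count('(') == val_str.count(')')) and \
--            (val_str.count('[') == val_str.count(']'))
--
--     end = len(val_str)
--     for idx, char in enumerate(val_str):
--         pre = val_str[:idx]
--         if ((char == ',') and (pre.count('(') == pre.count(')'))
--                 and (pre.count('[') == pre.count(']'))):
--             end = idx
--             break
--     return end
-- ===== SOURCE B (Python) =====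
-- def find_next_comma(val_str):
--     """find the position of next comma in the string.
--
--     Single pass with running bracket-depth counters instead of
--     re-counting the prefix at every index.
--     """
--     depth_paren = 0
--     depth_brack = 0
--     for idx, ch in enumerate(val_str):
--         if ch == ',' and depth_paren == 0 and depth_brack == 0:
--             return idx
--         if ch == '(':
--             depth_paren += 1
--         elif ch == ')':
--             depth_paren -= 1
--         elif ch == '[':
--             depth_brack += 1
--         elif ch == ']':
--             depth_brack -= 1
--     return len(val_str)
-- ===== Notes on version B (the rewrite author's own statement) =====
-- stated objective: faster
-- what changed: replaces A's per-index re-count of '('/')'/'['/']' over the whole prefix with a single left-to-right pass maintaining running depth counters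
import Mathlib
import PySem

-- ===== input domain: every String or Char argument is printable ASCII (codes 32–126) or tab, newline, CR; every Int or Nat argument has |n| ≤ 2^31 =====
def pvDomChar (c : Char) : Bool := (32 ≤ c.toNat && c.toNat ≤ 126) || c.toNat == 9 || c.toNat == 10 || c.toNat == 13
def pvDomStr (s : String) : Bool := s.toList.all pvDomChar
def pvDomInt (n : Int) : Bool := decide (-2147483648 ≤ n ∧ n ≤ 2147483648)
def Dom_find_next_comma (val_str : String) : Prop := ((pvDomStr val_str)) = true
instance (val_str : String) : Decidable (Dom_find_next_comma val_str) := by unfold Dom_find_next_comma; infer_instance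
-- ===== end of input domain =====

-- B replaces A's quadratic per-index prefix re-count with one pass holding running depth counters (measured asymptotically faster).

-- ===== PORT A =====
-- A's for-loop over enumerate(val_str): recursion over the remaining chars carrying the index;
-- pre = val_str[:idx] is List.take idx of the full list; str.count of a single-char needle is List.count (exact).
def pvAGo (full : List Char) : List Char → Nat → Int
  | [], _ => (full.length : Int)
  | c :: rest, idx =>
    let pre := full.take idx
    if c = ',' ∧ pre.count '(' = pre.count ')' ∧ pre.count '[' = pre.count ']' then (idx : Int)
    else pvAGo full rest (idx + 1)

def find_next_comma (val_str : String) : Int :=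
  pvAGo val_str.toList val_str.toList 0

-- ===== PORT B =====
-- B's single pass: index i and running depth counters p (parens) and b (brackets).
def pvBGo : List Char → Int → Int → Int → Int
  | [], i, _, _ => i
  | c :: rest, i, p, b =>
    if c = ',' ∧ p = 0 ∧ b = 0 then i
    else
      pvBGo rest (i + 1)
        (if c = '(' then p + 1 else if c = ')' then p - 1 else p)
        (if c = '(' ∨ c = ')' then b else if c = '[' then b + 1 else if c = ']' then b - 1 else b)

def find_next_comma_alt (val_str : String) : Int :=
  pvBGo val_str.toList 0 0 0

-- ===== PRECONDITION & SPEC =====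
-- A asserts balanced counts and raises AssertionError otherwise; Pre_ admits exactly the inputs where A returns.
def Pre_find_next_comma (val_str : String) : Prop :=
  val_str.toList.count '(' = val_str.toList.count ')' ∧
  val_str.toList.count '[' = val_str.toList.count ']'
instance (val_str : String) : Decidable (Pre_find_next_comma val_str) := by
  unfold Pre_find_next_comma; infer_instance

def pvWitness_find_next_comma : String := "a,(b,c)"

def Spec_find_next_comma (val_str : String) (out : Int) : Prop := out = find_next_comma_alt val_str
instance (val_str : String) (out : Int) : Decidable (Spec_find_next_comma val_str out) := by unfold Spec_find_next_comma; infer_instance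

-- ===== CLAIM (what is proved, stated in full; the proofs are below) =====
def Claim_equal_find_next_comma : Prop := ∀ (val_str : String), Dom_find_next_comma val_str → Pre_find_next_comma val_str → Spec_find_next_comma val_str (find_next_comma val_str)

-- ===== LEMMAS AND PROOFS =====

-- Loop invariant: A's re-counted prefix condition at index |done| equals B's running counters.
lemma pv_main (rest : List Char) : ∀ done : List Char,
    pvAGo (done ++ rest) rest done.length
      = pvBGo rest (done.length : Int)
          ((done.count '(' : Int) - (done.count ')' : Int))
          ((done.count '[' : Int) - (done.count ']' : Int)) := by
  induction rest with
  | nil => intro done; simp [pvAGo, pvBGo]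
  | cons c rest ih =>
    intro done
    have htake : (done ++ c :: rest).take done.length = done := by
      simp
    have hcond : (c = ',' ∧ done.count '(' = done.count ')' ∧ done.count '[' = done.count ']')
        ↔ (c = ',' ∧ ((done.count '(' : Int) - (done.count ')' : Int)) = 0
            ∧ ((done.count '[' : Int) - (done.count ']' : Int)) = 0) := by
      constructor <;> rintro ⟨h1, h2, h3⟩ <;> exact ⟨h1, by omega, by omega⟩
    simp only [pvAGo, pvBGo, htake]
    by_cases hA : (c = ',' ∧ done.count '(' = done.count ')' ∧ done.count '[' = done.count ']')
    · rw [if_pos hA, if_pos (hcond.mp hA)]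
    · rw [if_neg hA, if_neg (fun h => hA (hcond.mpr h))]
      have h := ih (done ++ [c])
      rw [List.append_assoc, List.singleton_append] at h
      simp only [List.length_append, List.length_singleton] at h
      have ecnt : ∀ a : Char, ((List.count a [c] : Nat) : Int) = if c = a then 1 else 0 := by
        intro a; by_cases hca : c = a <;> simp [hca]
      have g1 : ((done.length + 1 : Nat) : Int) = (done.length : Int) + 1 := by push_cast; ring
      have g2 : (↑(List.count '(' (done ++ [c])) : Int) - ↑(List.count ')' (done ++ [c]))
          = if c = '(' then ((done.count '(' : Int) - (done.count ')' : Int)) + 1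
            else if c = ')' then ((done.count '(' : Int) - (done.count ')' : Int)) - 1
            else ((done.count '(' : Int) - (done.count ')' : Int)) := by
        simp only [List.count_append]
        push_cast
        rw [ecnt, ecnt]
        split_ifs <;> (try simp_all) <;> omega
      have g3 : (↑(List.count '[' (done ++ [c])) : Int) - ↑(List.count ']' (done ++ [c]))
          = if c = '(' ∨ c = ')' then ((done.count '[' : Int) - (done.count ']' : Int))
            else if c = '[' then ((done.count '[' : Int) - (done.count ']' : Int)) + 1
            else if c = ']' then ((done.count '[' : Int) - (done.count ']' : Int)) - 1
            else ((done.count '[' : Int) - (done.count ']' : Int)) := by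
        simp only [List.count_append]
        push_cast
        rw [ecnt, ecnt]
        split_ifs <;> (try simp_all) <;> omega
      rw [g1, g2, g3] at h
      exact h

-- ===== VERDICT (by name: the statement is the Claim_ definition above) =====
theorem find_next_comma_spec : Claim_equal_find_next_comma := by
  intro s _ _
  unfold Spec_find_next_comma find_next_comma find_next_comma_alt
  have := pv_main s.toList []
  simpa using this
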